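-- pv_equiv track=rewrite | github.com/generative-computing/mellea | mellea/stdlib/requirements/python_tools.py | _sets_headless_backend
-- ===== SOURCE A (Python) =====
-- def _sets_headless_backend(code: str) -> bool:
--     """Check if code sets matplotlib to use a headless backend."""
--     headless_backends = ("Agg", "Svg", "Cairo", "PDF", "PS", "WebAgg", "nbAgg")
--     for backend in headless_backends:
--         if (
--             f"matplotlib.use('{backend}')" in code
--             or f'matplotlib.use("{backend}")' in code
--         ):
--             return True
--     return False
-- ===== SOURCE B (Python) =====
-- def _sets_headless_backend(code: str) -> bool:
--     """Check if code sets matplotlib to use a headless backend."""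
--     backends = {"Agg", "Svg", "Cairo", "PDF", "PS", "WebAgg", "nbAgg"}
--     call = "matplotlib.use("
--     i = code.find(call)
--     while i != -1:
--         arg = code[i + len(call):]
--         quote = arg[:1]
--         if quote in ("'", '"'):
--             end = arg.find(quote, 1)
--             if end != -1 and arg[end + 1:end + 2] == ")" and arg[1:end] in backends:
--                 return True
--         i = code.find(call, i + 1)
--     return False
-- ===== Notes on version B (the rewrite author's own statement) =====
-- stated objective: alternative
-- what changed: Replaces A's loop over 7 backends with two independent substring searches each (up to 14 scans of the code) by a parser that jumps with str.find between occurrences of the single 15-character call anchor and at each one reads the quote character, finds the matching close quote, checks the close paren and tests the quoted argument against the backend set.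
import Mathlib
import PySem

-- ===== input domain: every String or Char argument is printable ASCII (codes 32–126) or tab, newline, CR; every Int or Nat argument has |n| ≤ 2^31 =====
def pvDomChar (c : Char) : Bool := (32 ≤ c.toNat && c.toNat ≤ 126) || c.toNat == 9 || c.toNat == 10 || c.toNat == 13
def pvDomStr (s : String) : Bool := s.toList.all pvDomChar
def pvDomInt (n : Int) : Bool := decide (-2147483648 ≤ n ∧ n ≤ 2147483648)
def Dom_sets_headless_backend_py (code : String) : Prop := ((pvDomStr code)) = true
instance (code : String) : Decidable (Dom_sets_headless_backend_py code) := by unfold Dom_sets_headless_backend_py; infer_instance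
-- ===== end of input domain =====

-- B replaces A's 14 substring searches (two per backend) by a parser: it jumps with
-- str.find between the occurrences of the single anchor "matplotlib.use(" and at each
-- one reads the quote, the quoted argument and the closing ")", testing the argument
-- against the backend set (objective: alternative — an anchored parse instead of a
-- multi-pattern search).

-- ===== PORT A =====
-- A's f-strings: "matplotlib.use('" + backend + "')" and the double-quoted twin
def pvAPat1 (b : String) : List Char := "matplotlib.use('".toList ++ b.toList ++ "')".toList
def pvAPat2 (b : String) : List Char := "matplotlib.use(\"".toList ++ b.toList ++ "\")".toList

-- the 'for backend in headless_backends' loop with its early return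
def pvALoop (cs : List Char) : List String → Bool
  | [] => false
  | b :: rest =>
    if PySem.Chars.isIn (pvAPat1 b) cs || PySem.Chars.isIn (pvAPat2 b) cs then true
    else pvALoop cs rest

def sets_headless_backend_py (code : String) : Bool :=
  pvALoop code.toList ["Agg", "Svg", "Cairo", "PDF", "PS", "WebAgg", "nbAgg"]

-- ===== PORT B =====
-- Source B's set literal 'backends' (used only for the membership test 'in')
def pvBackends : List (List Char) :=
  ["Agg".toList, "Svg".toList, "Cairo".toList, "PDF".toList, "PS".toList,
   "WebAgg".toList, "nbAgg".toList]

-- Source B's 'call' anchor; its length is 15 (the 'i + len(call)' below)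
def pvCall : List Char := "matplotlib.use(".toList

-- the body of Source B's 'if quote in ...' block, on arg = code[i + len(call):]:
-- quote = arg[:1]; end = arg.find(quote, 1); the three-fold 'and' in order
def pvParse (arg : List Char) : Bool :=
  let quote := arg.take 1        -- arg[:1] (nonnegative bounds: a take)
  if quote = ['\''] || quote = ['"'] then
    let e := PySem.Chars.findFrom arg quote 1 none
    e != -1 && (PySem.List.slice arg (some (e + 1)) (some (e + 2)) == [')']) &&
      pvBackends.contains (PySem.List.slice arg (some 1) (some e))
  else false

-- a fact the while-loop's termination cites: a found index lies in [k, length]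
theorem pvFindFrom_bounds (cs sub : List Char) (k : Nat)
    (h : PySem.Chars.findFrom cs sub (k : Int) none ≠ -1) :
    k ≤ (PySem.Chars.findFrom cs sub (k : Int) none).toNat ∧
      (PySem.Chars.findFrom cs sub (k : Int) none).toNat ≤ cs.length := by
  by_cases hk : k ≤ cs.length
  · rw [PySem.Chars.findFrom_natCast cs sub k hk] at h ⊢
    have hne : PySem.Chars.find (cs.drop k) sub ≠ -1 := by
      intro he; rw [he] at h; simp at h
    have hge := PySem.Chars.neg_one_le_find (cs.drop k) sub
    have hle := PySem.Chars.find_le_length (cs.drop k) sub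
    simp only [List.length_drop] at hle
    rw [if_neg hne]
    omega
  · exfalso
    apply h
    have hlt : (cs.length : Int) < (k : Int) := by exact_mod_cast Nat.lt_of_not_le hk
    unfold PySem.Chars.findFrom
    simp only []
    rw [if_neg (by omega : ¬ (k : Int) < 0), if_pos (by omega : (cs.length : Int) < (k : Int))]

-- Source B's 'while i != -1' loop, entered at an occurrence index i of the anchor;
-- 'i = code.find(call, i + 1)' advances, so length + 1 - i decreases
def pvBLoop (cs : List Char) (i : Nat) : Bool :=
  if pvParse (cs.drop (i + 15)) then true
  else
    let nxt := PySem.Chars.findFrom cs pvCall ((i + 1 : Nat) : Int) none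
    if h : nxt = -1 then false
    else
      have := pvFindFrom_bounds cs pvCall (i + 1) h
      pvBLoop cs nxt.toNat
termination_by cs.length + 1 - i
decreasing_by omega

-- 'i = code.find(call)' then the loop (arg = code[i+15:] is a drop: i ≥ 0)
def sets_headless_backend_py_alt (code : String) : Bool :=
  let i := PySem.Chars.find code.toList pvCall
  if i = -1 then false else pvBLoop code.toList i.toNat

-- ===== PRECONDITION & SPEC =====
def Spec_sets_headless_backend_py (code : String) (out : Bool) : Prop := out = sets_headless_backend_py_alt code
instance (code : String) (out : Bool) : Decidable (Spec_sets_headless_backend_py code out) := by unfold Spec_sets_headless_backend_py; infer_instance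

-- ===== CLAIM (what is proved, stated in full; the proofs are below) =====
def Claim_equal_sets_headless_backend_py : Prop := ∀ (code : String), Dom_sets_headless_backend_py code → Spec_sets_headless_backend_py code (sets_headless_backend_py code)

-- ===== LEMMAS AND PROOFS =====

-- the 14 patterns A searches for, arranged around B's anchor/quote/backend split
def pvPats : List (List Char) :=
  pvBackends.flatMap fun b =>
    [pvCall ++ '\'' :: (b ++ ['\'', ')']), pvCall ++ '"' :: (b ++ ['"', ')'])]

-- A's backend loop is the any over the flattened (quote-expanded) pattern list
theorem pvALoop_eq_any (cs : List Char) (bs : List String) :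
    pvALoop cs bs =
      (bs.flatMap fun b => [pvAPat1 b, pvAPat2 b]).any fun p => PySem.Chars.isIn p cs := by
  induction bs with
  | nil => rfl
  | cons b rest ih =>
    simp only [pvALoop, List.flatMap_cons, List.any_append, List.any_cons, List.any_nil,
      Bool.if_true_left, ih, Bool.or_false, Bool.or_assoc, Bool.decide_eq_true]

-- A's seven backends with both quote styles give exactly pvPats
theorem pvPats_eq :
    ((["Agg", "Svg", "Cairo", "PDF", "PS", "WebAgg", "nbAgg"] : List String).flatMap
      fun b => [pvAPat1 b, pvAPat2 b]) = pvPats := rfl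

theorem pvA_iff (code : String) :
    sets_headless_backend_py code = true ↔ ∃ p ∈ pvPats, p <:+: code.toList := by
  unfold sets_headless_backend_py
  rw [pvALoop_eq_any, pvPats_eq]
  simp only [List.any_eq_true, PySem.Chars.isIn_iff_infix]

-- parse correctness: the quote/find/close-paren checks accept exactly the
-- quote-wrapped backend prefixes
theorem pvNoQuote : ∀ b ∈ pvBackends, '\'' ∉ b ∧ '"' ∉ b := by decide

theorem pvInfix_iff_exists_drop (sub cs : List Char) :
    sub <:+: cs ↔ ∃ j, sub <+: cs.drop j := by
  rw [← PySem.Chars.isIn_iff_infix, ← PySem.Chars.exists_prefix_drop_iff_isIn]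

theorem pvPrefix_append_drop {u v l : List Char} {j : Nat}
    (h1 : u <+: l.drop j) (h2 : v <+: l.drop (j + u.length)) :
    u ++ v <+: l.drop j := by
  obtain ⟨t1, ht1⟩ := h1
  have hd : l.drop (j + u.length) = t1 := by
    have : l.drop (j + u.length) = (l.drop j).drop u.length := by
      rw [List.drop_drop, Nat.add_comm]
    rw [this, ← ht1, List.drop_left]
  rw [hd] at h2
  obtain ⟨t2, ht2⟩ := h2
  exact ⟨t2, by rw [List.append_assoc, ht2, ht1]⟩

theorem pvPrefix_split {v l : List Char} {j : Nat}
    (h : pvCall ++ v <+: l.drop j) :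
    pvCall <+: l.drop j ∧ v <+: l.drop (j + 15) := by
  obtain ⟨t, ht⟩ := h
  constructor
  · exact ⟨v ++ t, by rw [← ht]; simp⟩
  · have hd : l.drop (j + 15) = v ++ t := by
      have h15 : pvCall.length = 15 := rfl
      have : l.drop (j + 15) = (l.drop j).drop 15 := by
        rw [List.drop_drop, Nat.add_comm]
      rw [this, ← ht, List.append_assoc, ← h15, List.drop_left]
    exact ⟨t, by rw [hd]⟩

theorem pvParse_iff (arg : List Char) :
    pvParse arg = true ↔
      ∃ b ∈ pvBackends, ∃ q ∈ (['\'', '"'] : List Char),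
        (q :: (b ++ [q, ')'])) <+: arg := by
  constructor
  · intro h
    unfold pvParse at h
    simp only [] at h
    split at h
    case isFalse => simp at h
    case isTrue hq =>
      obtain ⟨q, t, rfl, hqq⟩ : ∃ q t, arg = q :: t ∧ (q = '\'' ∨ q = '"') := by
        rcases Bool.or_eq_true _ _ |>.mp hq with h1 | h1 <;>
        · rw [decide_eq_true_iff] at h1
          cases arg with
          | nil => simp at h1
          | cons a t => exact ⟨a, t, rfl, by simp_all⟩
      simp only [List.take_succ_cons, List.take_zero] at h
      simp only [Bool.and_eq_true, bne_iff_ne, beq_iff_eq] at h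
      obtain ⟨⟨hE, hClose⟩, hMem⟩ := h
      have hb := pvFindFrom_bounds (q :: t) [q] 1 (by exact_mod_cast hE)
      have hspec := PySem.Chars.findFrom_natCast_spec (q :: t) [q] 1 (by simp)
        (by exact_mod_cast hE)
      simp only [Nat.cast_one] at hspec hb
      obtain ⟨h1e, hpre, hmin⟩ := hspec
      set e := PySem.Chars.findFrom (q :: t) [q] 1 none with hedef
      have he0 : 0 ≤ e := le_trans (by norm_num) h1e
      set m := e.toNat with hmdef
      have hem : e = (m : Int) := (Int.toNat_of_nonneg he0).symm
      have hm1 : 1 ≤ m := by omega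
      -- drop m = q :: r1
      obtain ⟨r1, hr1⟩ := hpre
      simp only [List.singleton_append] at hr1
      have hr1' : (q :: t).drop m = q :: r1 := hr1.symm
      -- drop (m+1) starts with ')'
      rw [hem] at hClose
      rw [show ((m:Int) + 1) = ((m+1 : Nat) : Int) by push_cast; ring,
          show ((m:Int) + 2) = ((m+2 : Nat) : Int) by push_cast; ring,
          PySem.List.slice_natCast] at hClose
      have htake1 : ((q :: t).drop (m+1)).take 1 = [')'] := by
        simpa [show m+2-(m+1) = 1 from by omega] using hClose
      obtain ⟨r2, hr2⟩ : ∃ r2, (q :: t).drop (m+1) = ')' :: r2 := by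
        cases hd : (q :: t).drop (m+1) with
        | nil => rw [hd] at htake1; simp at htake1
        | cons c cb =>
          rw [hd] at htake1; simp at htake1; exact ⟨cb, by rw [htake1]⟩
      -- the backend slice
      rw [hem, show ((1:Int)) = ((1:Nat) : Int) by norm_num,
          PySem.List.slice_natCast] at hMem
      have hbm : (t.take (m - 1)) ∈ pvBackends := by
        have := List.mem_of_elem_eq_true hMem
        simpa using this
      refine ⟨t.take (m-1), hbm, q, by simpa using hqq, ?_⟩
      have hdm : t.drop (m-1) = q :: r1 := by
        rw [show m = (m-1)+1 from by omega, List.drop_succ_cons] at hr1'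
        exact hr1'
      have hdm1 : t.drop m = ')' :: r2 := by
        rw [show m+1 = m+1 from rfl, List.drop_succ_cons] at hr2
        exact hr2
      have hr1e : r1 = ')' :: r2 := by
        have hmt : t.drop m = r1 := by
          have : t.drop m = (t.drop (m-1)).drop 1 := by
            rw [List.drop_drop]; congr 1; omega
          rw [this, hdm]
          simp
        rw [← hmt, hdm1]
      refine ⟨r2, ?_⟩
      have hsplit := List.take_append_drop (m-1) t
      rw [hdm, hr1e] at hsplit
      show q :: (List.take (m-1) t ++ [q, ')']) ++ r2 = q :: t
      conv_rhs => rw [← hsplit]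
      simp
  · rintro ⟨b, hbmem, q, hqmem, r, hr⟩
    simp only [List.mem_cons, List.not_mem_nil, or_false] at hqmem
    have harg : arg = q :: (b ++ ([q, ')'] ++ r)) := by
      rw [← hr]; simp
    subst harg
    have hqnb : q ∉ b := by
      rcases hqmem with h | h <;> rw [h]
      · exact (pvNoQuote b hbmem).1
      · exact (pvNoQuote b hbmem).2
    set X := b ++ ([q, ')'] ++ r) with hX
    have harglen : 1 ≤ (q :: X).length := by simp
    have hoccd : (q :: X).drop (1 + b.length) = q :: (')' :: r) := by
      rw [show 1 + b.length = b.length + 1 from by omega, List.drop_succ_cons, hX,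
          List.drop_left]
      rfl
    have hocc : [q] <:+: (q :: X).drop 1 := by
      rw [List.drop_succ_cons, List.drop_zero, hX]
      exact ⟨b, ')' :: r, by rw [List.append_assoc]; rfl⟩
    have hne : PySem.Chars.findFrom (q :: X) [q] 1 none ≠ -1 := by
      have := (PySem.Chars.findFrom_natCast_eq_neg_one_iff (q :: X) [q] 1 harglen)
      simp only [Nat.cast_one] at this
      rw [Ne, this]
      exact fun hc => hc hocc
    have hspec := PySem.Chars.findFrom_natCast_spec (q :: X) [q] 1 harglen
      (by exact_mod_cast hne)
    simp only [Nat.cast_one] at hspec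
    obtain ⟨h1e, hpre, hmin⟩ := hspec
    set e := PySem.Chars.findFrom (q :: X) [q] 1 none with hedef
    have he0 : 0 ≤ e := le_trans (by norm_num) h1e
    set m := e.toNat with hmdef
    have hm1 : 1 ≤ m := by omega
    have hnotgt : ¬ (1 + b.length < m) := by
      intro hlt
      exact hmin (1 + b.length) (by omega) hlt ⟨')' :: r, by rw [hoccd]; simp⟩
    have hnotlt : ¬ (m < 1 + b.length) := by
      intro hlt
      have hdropm : (q :: X).drop m = b.drop (m-1) ++ ([q, ')'] ++ r) := by
        have h1 : (q :: X).drop m = X.drop (m-1) := by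
          conv_lhs => rw [show m = (m-1)+1 from by omega, List.drop_succ_cons]
        rw [h1, hX, List.drop_append_of_le_length (by omega)]
      rw [hdropm] at hpre
      cases hd : b.drop (m-1) with
      | nil =>
        have := congrArg List.length hd
        simp at this
        omega
      | cons c cb =>
        rw [hd] at hpre
        obtain ⟨u, hu⟩ := hpre
        have hcq : q = c := by
          have := congrArg List.head? hu
          simpa using this
        apply hqnb
        rw [hcq]
        exact List.mem_of_mem_drop (hd ▸ List.mem_cons_self ..)
    have hmval : m = 1 + b.length := by omega
    have hem : e = ((1 + b.length : Nat) : Int) := by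
      rw [← hmval, hmdef, Int.toNat_of_nonneg he0]
    -- now evaluate the boolean
    unfold pvParse
    simp only [List.take_succ_cons, List.take_zero]
    rw [if_pos (by rcases hqmem with h | h <;> simp [h])]
    rw [← hedef, hem]
    have hc1 : PySem.List.slice (q :: X) (some (((1 + b.length : Nat) : Int) + 1))
        (some (((1 + b.length : Nat) : Int) + 2)) = [')'] := by
      rw [show (((1 + b.length : Nat) : Int) + 1) = ((b.length + 2 : Nat) : Int) by
            push_cast; ring,
          show (((1 + b.length : Nat) : Int) + 2) = ((b.length + 3 : Nat) : Int) by
            push_cast; ring,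
          PySem.List.slice_natCast]
      have : (q :: X).drop (b.length + 2) = ')' :: r := by
        rw [List.drop_succ_cons, hX, show b.length + 1 = b.length + 1 from rfl]
        rw [← List.drop_drop, List.drop_left]
        simp
      rw [this]
      simp [show b.length + 3 - (b.length + 2) = 1 from by omega]
    have hc2 : PySem.List.slice (q :: X) (some 1) (some ((1 + b.length : Nat) : Int)) = b := by
      rw [show (1 : Int) = ((1 : Nat) : Int) by norm_num, PySem.List.slice_natCast]
      rw [List.drop_succ_cons, List.drop_zero, hX,
          show 1 + b.length - 1 = b.length from by omega, List.take_left]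
    rw [hc1, hc2]
    have hb' : pvBackends.contains b = true := List.elem_eq_true_of_mem hbmem
    rw [hb']
    simp only [beq_self_eq_true, Bool.and_true, bne_iff_ne, ne_eq]
    intro hc
    omega


-- the while-loop, entered at any index, finds exactly the accepted occurrences ≥ i
theorem pvBLoop_iff (cs : List Char) : ∀ i, pvCall <+: cs.drop i →
    (pvBLoop cs i = true ↔
      ∃ j, i ≤ j ∧ pvCall <+: cs.drop j ∧ pvParse (cs.drop (j + 15)) = true) := by
  have hcl : pvCall ≠ [] := by decide
  have key : ∀ n i, cs.length + 1 - i ≤ n → pvCall <+: cs.drop i →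
      (pvBLoop cs i = true ↔
        ∃ j, i ≤ j ∧ pvCall <+: cs.drop j ∧ pvParse (cs.drop (j + 15)) = true) := by
    intro n
    induction n with
    | zero =>
      intro i hn hocc
      exfalso
      have hlt : i < cs.length := by
        by_contra hge
        rw [List.drop_eq_nil_of_le (by omega)] at hocc
        exact hcl (List.prefix_nil.mp hocc)
      omega
    | succ n ih =>
      intro i hn hocc
      have hlt : i < cs.length := by
        by_contra hge
        rw [List.drop_eq_nil_of_le (by omega)] at hocc
        exact hcl (List.prefix_nil.mp hocc)
      rw [pvBLoop]
      split
      case isTrue hp =>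
        constructor
        · intro _
          exact ⟨i, le_refl i, hocc, hp⟩
        · intro _
          rfl
      case isFalse hp =>
        simp only []
        split
        case isTrue hnone =>
          constructor
          · intro hfalse
            exact absurd hfalse (by simp)
          · rintro ⟨j, hij, hoccj, hpj⟩
            have hji : i ≠ j := fun he => hp (he ▸ hpj)
            have hj1 : i + 1 ≤ j := by omega
            have hinf : pvCall <:+: cs.drop (i + 1) := by
              rw [pvInfix_iff_exists_drop]
              refine ⟨j - (i+1), ?_⟩
              have : (cs.drop (i+1)).drop (j - (i+1)) = cs.drop j := by
                rw [List.drop_drop]; congr 1; omega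
              rw [this]; exact hoccj
            have := (PySem.Chars.findFrom_natCast_eq_neg_one_iff cs pvCall (i+1)
              (by omega)).mp hnone
            exact absurd hinf this
        case isFalse hnone =>
          have hbnd := pvFindFrom_bounds cs pvCall (i+1) hnone
          have hspec := PySem.Chars.findFrom_natCast_spec cs pvCall (i+1)
            (by omega) hnone
          obtain ⟨hge1, hprenxt, hminnxt⟩ := hspec
          set nxt := PySem.Chars.findFrom cs pvCall ((i+1 : Nat) : Int) none with hnxt
          have ihh := ih nxt.toNat (by omega) hprenxt
          rw [ihh]
          constructor
          · rintro ⟨j, hj, h2, h3⟩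
            exact ⟨j, by omega, h2, h3⟩
          · rintro ⟨j, hij, hoccj, hpj⟩
            have hji : i ≠ j := fun he => hp (he ▸ hpj)
            have hj1 : i + 1 ≤ j := by omega
            have hjge : nxt.toNat ≤ j := by
              by_contra hjlt
              exact hminnxt j hj1 (by omega) hoccj
            exact ⟨j, hjge, hoccj, hpj⟩
  intro i hocc
  exact key (cs.length + 1 - i) i (le_refl _) hocc


theorem pvB_iff (code : String) :
    sets_headless_backend_py_alt code = true ↔
      ∃ j, pvCall <+: code.toList.drop j ∧ pvParse (code.toList.drop (j + 15)) = true := by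
  unfold sets_headless_backend_py_alt
  simp only []
  set cs := code.toList with hcs
  split
  case isTrue hneg =>
    have hno : ¬ pvCall <:+: cs := PySem.Chars.find_eq_neg_one_iff cs pvCall |>.mp hneg
    constructor
    · intro h; exact absurd h (by simp)
    · rintro ⟨j, hoccj, _⟩
      exact absurd ((pvInfix_iff_exists_drop pvCall cs).mpr ⟨j, hoccj⟩) hno
  case isFalse hneg =>
    have h0 : 0 ≤ PySem.Chars.find cs pvCall := by
      have := PySem.Chars.neg_one_le_find cs pvCall
      omega
    obtain ⟨hpre0, hmin0⟩ := PySem.Chars.find_spec h0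
    rw [pvBLoop_iff cs _ hpre0]
    constructor
    · rintro ⟨j, _, h2, h3⟩; exact ⟨j, h2, h3⟩
    · rintro ⟨j, hoccj, hpj⟩
      refine ⟨j, ?_, hoccj, hpj⟩
      by_contra hjlt
      exact hmin0 j (by omega) hoccj


-- glue: an accepted occurrence of the anchor is exactly an infix pattern
theorem pvOcc_iff (cs : List Char) :
    (∃ j, pvCall <+: cs.drop j ∧ pvParse (cs.drop (j + 15)) = true) ↔
      ∃ p ∈ pvPats, p <:+: cs := by
  constructor
  · rintro ⟨j, hoccj, hpj⟩
    rw [pvParse_iff] at hpj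
    obtain ⟨b, hb, q, hq, hpre⟩ := hpj
    refine ⟨pvCall ++ q :: (b ++ [q, ')']), ?_, ?_⟩
    · simp only [pvPats, List.mem_flatMap]
      refine ⟨b, hb, ?_⟩
      simp only [List.mem_cons, List.not_mem_nil, or_false] at hq
      rcases hq with h | h <;> subst h <;> simp
    · rw [pvInfix_iff_exists_drop]
      refine ⟨j, ?_⟩
      have h15 : pvCall.length = 15 := rfl
      exact pvPrefix_append_drop hoccj (by rw [h15]; exact hpre)
  · rintro ⟨p, hp, hinf⟩
    simp only [pvPats, List.mem_flatMap, List.mem_cons, List.not_mem_nil, or_false] at hp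
    obtain ⟨b, hb, hp2⟩ := hp
    obtain ⟨q, hq, rfl⟩ : ∃ q, q ∈ (['\'', '"'] : List Char) ∧
        p = pvCall ++ q :: (b ++ [q, ')']) := by
      rcases hp2 with h | h
      · exact ⟨'\'', by simp, h⟩
      · exact ⟨'"', by simp, h⟩
    rw [pvInfix_iff_exists_drop] at hinf
    obtain ⟨j, hpre⟩ := hinf
    obtain ⟨h1, h2⟩ := pvPrefix_split hpre
    exact ⟨j, h1, (pvParse_iff _).mpr ⟨b, hb, q, hq, h2⟩⟩


-- ===== VERDICT (by name: the statement is the Claim_ definition above) =====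
theorem sets_headless_backend_py_spec : Claim_equal_sets_headless_backend_py := by
  intro code _
  show sets_headless_backend_py code = sets_headless_backend_py_alt code
  apply Bool.eq_iff_iff.mpr
  rw [pvA_iff, pvB_iff, pvOcc_iff]
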